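-- pv_equiv track=rewrite | github.com/gjalt-h/BScAI_thesis2022_usefulness_stereotypes | rescorla.py | unique_att_grouped_useful
-- ===== SOURCE A (Python) =====
-- def unique_att_grouped_useful(iteration):
--     att_groups = [[] for _ in range(3)]
--     for alien in iteration:
--         for attribute in alien:
--             if attribute < 16:
--                 att_groups[0].append(attribute)
--             elif attribute < 32:
--                 att_groups[1].append(attribute)
--             else:
--                 att_groups[2].append(attribute)
--     return att_groups
-- ===== SOURCE B (Python) =====
-- def unique_att_grouped_useful(iteration):
--     flat = [a for alien in iteration for a in alien]
--     return [[a for a in flat if a < 16],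
--             [a for a in flat if 16 <= a < 32],
--             [a for a in flat if a >= 32]]
-- ===== Notes on version B (the rewrite author's own statement) =====
-- stated objective: simpler
-- what changed: Replaces the single nested partitioning loop appending into a mutable 3-bucket table with a flatten followed by three independent filter passes over the flat list.
import Mathlib
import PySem

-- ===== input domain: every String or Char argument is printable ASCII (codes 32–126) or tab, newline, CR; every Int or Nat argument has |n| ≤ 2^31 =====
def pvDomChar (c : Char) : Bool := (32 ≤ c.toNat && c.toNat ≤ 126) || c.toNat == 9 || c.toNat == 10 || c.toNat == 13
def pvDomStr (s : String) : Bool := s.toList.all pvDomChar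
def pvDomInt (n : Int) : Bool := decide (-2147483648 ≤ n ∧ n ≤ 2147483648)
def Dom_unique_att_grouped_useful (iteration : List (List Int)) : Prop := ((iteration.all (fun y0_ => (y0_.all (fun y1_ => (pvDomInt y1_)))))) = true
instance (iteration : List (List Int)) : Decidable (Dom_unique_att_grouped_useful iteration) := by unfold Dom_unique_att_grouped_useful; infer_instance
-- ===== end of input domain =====

-- B flattens the input once and builds each bucket by its own filter pass, instead of A's single nested loop appending into a 3-bucket table; objective: simpler.


-- ===== PORT A =====
-- state: the three buckets (g0, g1, g2); each loop iteration appends to one of them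
def unique_att_grouped_useful (iteration : List (List Int)) : List (List Int) :=
  let st := iteration.foldl (fun (st : List Int × List Int × List Int) alien =>
    alien.foldl (fun (st : List Int × List Int × List Int) att =>
      if att < 16 then (st.1 ++ [att], st.2.1, st.2.2)
      else if att < 32 then (st.1, st.2.1 ++ [att], st.2.2)
      else (st.1, st.2.1, st.2.2 ++ [att])) st) ([], [], [])
  [st.1, st.2.1, st.2.2]

-- ===== PORT B =====
def unique_att_grouped_useful_alt (iteration : List (List Int)) : List (List Int) :=
  let flat := iteration.flatMap (fun alien => alien)
  [flat.filter (fun a => a < 16),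
   flat.filter (fun a => 16 ≤ a ∧ a < 32),
   flat.filter (fun a => 32 ≤ a)]

-- ===== PRECONDITION & SPEC =====
def Spec_unique_att_grouped_useful (iteration : List (List Int)) (out : List (List Int)) : Prop := out = unique_att_grouped_useful_alt iteration
instance (iteration : List (List Int)) (out : List (List Int)) : Decidable (Spec_unique_att_grouped_useful iteration out) := by unfold Spec_unique_att_grouped_useful; infer_instance

-- ===== CLAIM (what is proved, stated in full; the proofs are below) =====
def Claim_equal_unique_att_grouped_useful : Prop := ∀ (iteration : List (List Int)), Dom_unique_att_grouped_useful iteration → Spec_unique_att_grouped_useful iteration (unique_att_grouped_useful iteration)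

-- ===== LEMMAS AND PROOFS =====

-- the inner fold over one list appends each element's bucket-filter to the running state
theorem pvInnerFold (xs : List Int) (st : List Int × List Int × List Int) :
    xs.foldl (fun (st : List Int × List Int × List Int) att =>
      if att < 16 then (st.1 ++ [att], st.2.1, st.2.2)
      else if att < 32 then (st.1, st.2.1 ++ [att], st.2.2)
      else (st.1, st.2.1, st.2.2 ++ [att])) st
    = (st.1 ++ xs.filter (fun a => decide (a < 16)),
       st.2.1 ++ xs.filter (fun a => decide (16 ≤ a ∧ a < 32)),
       st.2.2 ++ xs.filter (fun a => decide (32 ≤ a))) := by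
  induction xs generalizing st with
  | nil => simp
  | cons x xs ih =>
    simp only [List.foldl_cons, List.filter_cons]
    by_cases h1 : x < 16
    · simp [h1, ih, List.append_assoc]
      all_goals omega
    · by_cases h2 : x < 32
      · simp [h1, h2, ih, List.append_assoc]
      · simp [h1, h2, ih, List.append_assoc]

theorem pvOuterFold (iteration : List (List Int)) (st : List Int × List Int × List Int) :
    iteration.foldl (fun (st : List Int × List Int × List Int) alien =>
      alien.foldl (fun (st : List Int × List Int × List Int) att =>
        if att < 16 then (st.1 ++ [att], st.2.1, st.2.2)
        else if att < 32 then (st.1, st.2.1 ++ [att], st.2.2)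
        else (st.1, st.2.1, st.2.2 ++ [att])) st) st
    = (st.1 ++ (iteration.flatMap (fun a => a)).filter (fun a => decide (a < 16)),
       st.2.1 ++ (iteration.flatMap (fun a => a)).filter (fun a => decide (16 ≤ a ∧ a < 32)),
       st.2.2 ++ (iteration.flatMap (fun a => a)).filter (fun a => decide (32 ≤ a))) := by
  induction iteration generalizing st with
  | nil => simp
  | cons a as ih =>
    rw [List.foldl_cons, pvInnerFold, ih]
    simp [List.append_assoc]

-- ===== VERDICT (by name: the statement is the Claim_ definition above) =====
theorem unique_att_grouped_useful_spec : Claim_equal_unique_att_grouped_useful := by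
  intro iteration _
  unfold Spec_unique_att_grouped_useful unique_att_grouped_useful unique_att_grouped_useful_alt
  simp [pvOuterFold]
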